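-- pv_equiv track=rewrite | github.com/Daerwang2020/conversation-chart | scripts/render_png.py | simplify_polyline
-- ===== SOURCE A (Python) =====
-- from typing import Dict, List, Tuple
--
-- Point = Tuple[int, int]
--
-- def simplify_polyline(points: List[Point]) -> List[Point]:
--     if len(points) <= 2:
--         return points
--     simplified = [points[0]]
--     for i in range(1, len(points) - 1):
--         a = simplified[-1]
--         b = points[i]
--         c = points[i + 1]
--         if (a[0] == b[0] == c[0]) or (a[1] == b[1] == c[1]):
--             continue
--         simplified.append(b)
--     simplified.append(points[-1])
--
--     deduped: List[Point] = []
--     for p in simplified: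
--         if not deduped or deduped[-1] != p:
--             deduped.append(p)
--     return deduped
-- ===== SOURCE B (Python) =====
-- from typing import List, Tuple
--
-- Point = Tuple[int, int]
--
-- def simplify_polyline(points: List[Point]) -> List[Point]:
--     if len(points) <= 2:
--         return points
--     a = points[0]
--     out = [a]
--     for b, c in zip(points[1:], points[2:]):
--         if a[0] == b[0] == c[0] or a[1] == b[1] == c[1] or b == a:
--             continue
--         out.append(b)
--         a = b
--     if points[-1] != a:
--         out.append(points[-1])
--     return out
-- ===== Notes on version B (the rewrite author's own statement) =====
-- stated objective: alternative
-- what changed: Replaces A's index-driven loop plus separate adjacent-dedup pass over an intermediate list with a single anchor-carrying traversal of zipped consecutive pairs that never indexes and never builds the intermediate list.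
import Mathlib
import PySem

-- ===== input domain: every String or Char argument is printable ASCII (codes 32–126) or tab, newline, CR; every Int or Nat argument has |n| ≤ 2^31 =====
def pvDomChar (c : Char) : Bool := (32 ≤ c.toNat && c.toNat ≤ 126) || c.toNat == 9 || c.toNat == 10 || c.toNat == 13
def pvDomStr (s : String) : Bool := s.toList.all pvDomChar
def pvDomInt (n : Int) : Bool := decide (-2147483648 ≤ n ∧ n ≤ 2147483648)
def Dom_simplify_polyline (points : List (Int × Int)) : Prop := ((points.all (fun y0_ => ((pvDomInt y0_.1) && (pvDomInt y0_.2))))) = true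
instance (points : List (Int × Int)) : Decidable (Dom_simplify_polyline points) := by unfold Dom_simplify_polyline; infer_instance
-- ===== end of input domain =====

-- B replaces A's index loop + separate dedup pass by one anchor-carrying traversal of zipped consecutive pairs (objective: alternative).

-- ===== PORT A =====
-- the collinearity test (a[0]==b[0]==c[0]) or (a[1]==b[1]==c[1])
def pvCollinear (a b c : Int × Int) : Bool :=
  (a.1 == b.1 && b.1 == c.1) || (a.2 == b.2 && b.2 == c.2)

-- one step of A's first loop: a = simplified[-1], b = points[i], c = points[i+1]
def pvStepA (points : List (Int × Int)) (s : List (Int × Int)) (i : Int) : List (Int × Int) :=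
  let a := PySem.List.pyGetD s (-1) (0, 0)
  let b := PySem.List.pyGetD points i (0, 0)
  let c := PySem.List.pyGetD points (i + 1) (0, 0)
  if pvCollinear a b c then s else s ++ [b]

-- one step of A's second loop: if not deduped or deduped[-1] != p: deduped.append(p)
def pvDedupStep (acc : List (Int × Int)) (p : Int × Int) : List (Int × Int) :=
  if acc = [] ∨ PySem.List.pyGet? acc (-1) ≠ some p then acc ++ [p] else acc

def simplify_polyline (points : List (Int × Int)) : List (Int × Int) :=
  if PySem.List.len points ≤ 2 then points
  else
    let simplified :=
      (PySem.List.pyRange 1 (PySem.List.len points - 1) 1).foldl (pvStepA points)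
        [PySem.List.pyGetD points 0 (0, 0)]
    let simplified := simplified ++ [PySem.List.pyGetD points (-1) (0, 0)]
    simplified.foldl pvDedupStep []

-- ===== PORT B =====
-- B's loop state is (anchor, out); one step consumes a zipped pair (b, c):
-- skip when collinear with the anchor or equal to it, otherwise emit b and move the anchor
def pvStepB (st : (Int × Int) × List (Int × Int)) (bc : (Int × Int) × (Int × Int)) :
    (Int × Int) × List (Int × Int) :=
  if (st.1.1 == bc.1.1 && bc.1.1 == bc.2.1) || (st.1.2 == bc.1.2 && bc.1.2 == bc.2.2)
      || bc.1 == st.1 then st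
  else (bc.1, st.2 ++ [bc.1])

def simplify_polyline_alt (points : List (Int × Int)) : List (Int × Int) :=
  if points.length ≤ 2 then points
  else
    let a0 := points.headD (0, 0)
    let st := ((points.drop 1).zip (points.drop 2)).foldl pvStepB (a0, [a0])
    let lastp := points.getLast?.getD (0, 0)
    if lastp ≠ st.1 then st.2 ++ [lastp] else st.2

-- ===== PRECONDITION & SPEC =====
def Spec_simplify_polyline (points : List (Int × Int)) (out : List (Int × Int)) : Prop := out = simplify_polyline_alt points
instance (points : List (Int × Int)) (out : List (Int × Int)) : Decidable (Spec_simplify_polyline points out) := by unfold Spec_simplify_polyline; infer_instance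

-- ===== CLAIM =====
def Claim_equal_simplify_polyline : Prop := ∀ (points : List (Int × Int)), Dom_simplify_polyline points → Spec_simplify_polyline points (simplify_polyline points)

-- ===== LEMMAS AND PROOFS =====

-- A's second loop as a function
def pvDedup (xs : List (Int × Int)) : List (Int × Int) := xs.foldl pvDedupStep []

theorem pvDedup_append (xs : List (Int × Int)) (p : Int × Int) :
    pvDedup (xs ++ [p]) = pvDedupStep (pvDedup xs) p := by
  simp [pvDedup, List.foldl_append]

-- dedup of a nonempty list is nonempty and has the same last element
theorem pvDedup_last (xs : List (Int × Int)) (h : xs ≠ []) :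
    pvDedup xs ≠ [] ∧ (pvDedup xs).getLast? = xs.getLast? := by
  induction xs using List.reverseRecOn with
  | nil => exact absurd rfl h
  | append_singleton ys p ih =>
    rw [pvDedup_append]
    by_cases hy : ys = []
    · subst hy
      simp [pvDedup, pvDedupStep]
    · obtain ⟨hne, hlast⟩ := ih hy
      unfold pvDedupStep
      split
      · simp
      · rename_i hcond
        push Not at hcond
        refine ⟨hne, ?_⟩
        rw [PySem.List.pyGet?_neg_one] at hcond
        simp [hcond.2, List.getLast?_append]

-- A's loop body, seen as a function of the zipped pair (b, c)
def pvStepZ (s : List (Int × Int)) (bc : (Int × Int) × (Int × Int)) : List (Int × Int) :=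
  if pvCollinear (PySem.List.pyGetD s (-1) (0, 0)) bc.1 bc.2 then s else s ++ [bc.1]

-- the zipped consecutive pairs are exactly the (points[i], points[i+1]) of A's index range
theorem pvZipEq (points : List (Int × Int)) :
    (points.drop 1).zip (points.drop 2) =
      (PySem.List.pyRange 1 (PySem.List.len points - 1) 1).map
        (fun i => (PySem.List.pyGetD points i (0, 0), PySem.List.pyGetD points (i + 1) (0, 0))) := by
  apply List.ext_getElem
  · simp [PySem.List.length_pyRange_one, PySem.List.len]
    omega
  · intro k h1 h2
    have hk : k + 2 < points.length := by
      simp [List.length_zip] at h1; omega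
    simp only [List.getElem_zip, List.getElem_drop, List.getElem_map,
      PySem.List.getElem_pyRange_one]
    have e1 : PySem.List.pyGetD points (1 + (k : Int)) (0, 0) = points[(1 + (k : Int)).toNat] :=
      PySem.List.pyGetD_eq_getElem points (0, 0) (by omega) (by omega)
    have e2 : PySem.List.pyGetD points (1 + (k : Int) + 1) (0, 0) = points[(1 + (k : Int) + 1).toNat] :=
      PySem.List.pyGetD_eq_getElem points (0, 0) (by omega) (by omega)
    have t1 : (1 + (k : Int)).toNat = 1 + k := by omega
    have t2 : (1 + (k : Int) + 1).toNat = 2 + k := by omega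
    simp [e1, e2, t1, t2]

-- A's fold over the index range equals the pvStepZ fold over the zipped pairs
theorem pvFoldAZ (points : List (Int × Int)) (init : List (Int × Int)) :
    (PySem.List.pyRange 1 (PySem.List.len points - 1) 1).foldl (pvStepA points) init =
      ((points.drop 1).zip (points.drop 2)).foldl pvStepZ init := by
  rw [pvZipEq, List.foldl_map]
  rfl

-- main invariant: B's state is always (last of A's list, dedup of A's list)
theorem pvInv (Z : List ((Int × Int) × (Int × Int))) :
    ∀ (s : List (Int × Int)) (a : Int × Int), s ≠ [] → s.getLast? = some a →
      Z.foldl pvStepZ s ≠ [] ∧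
      (Z.foldl pvStepZ s).getLast? = some (Z.foldl pvStepB (a, pvDedup s)).1 ∧
      (Z.foldl pvStepB (a, pvDedup s)).2 = pvDedup (Z.foldl pvStepZ s) := by
  induction Z with
  | nil => intro s a hs ha; exact ⟨hs, by simpa using ha, rfl⟩
  | cons bc Z ih =>
    intro s a hs ha
    obtain ⟨b, c⟩ := bc
    obtain ⟨hdne, hdlast⟩ := pvDedup_last s hs
    have hga : PySem.List.pyGetD s (-1) (0, 0) = a := by
      rw [PySem.List.pyGetD_neg_one _ _ hs]
      rw [List.getLast?_eq_some_getLast hs] at ha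
      exact Option.some.inj ha
    simp only [List.foldl_cons]
    by_cases hcol : pvCollinear a b c = true
    · have hZ : pvStepZ s (b, c) = s := by simp [pvStepZ, hga, hcol]
      have hB : pvStepB (a, pvDedup s) (b, c) = (a, pvDedup s) := by
        unfold pvStepB
        dsimp only
        rw [if_pos]
        simp only [pvCollinear, Bool.or_eq_true, Bool.and_eq_true, beq_iff_eq] at hcol ⊢
        tauto
      rw [hZ, hB]; exact ih s a hs ha
    · have hZ : pvStepZ s (b, c) = s ++ [b] := by simp [pvStepZ, hga, hcol]
      rw [hZ]
      by_cases hba : b = a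
      · have hB : pvStepB (a, pvDedup s) (b, c) = (a, pvDedup s) := by
          simp [pvStepB, hba]
        have hd : pvDedup (s ++ [b]) = pvDedup s := by
          rw [pvDedup_append]
          unfold pvDedupStep
          rw [if_neg]
          push Not
          refine ⟨hdne, ?_⟩
          rw [PySem.List.pyGet?_neg_one, hdlast, ha, hba]
        have hl : (s ++ [b]).getLast? = some a := by simp [hba]
        rw [hB, ← hd]
        exact ih (s ++ [b]) a (by simp) hl
      · have hB : pvStepB (a, pvDedup s) (b, c) = (b, pvDedup s ++ [b]) := by
          unfold pvStepB
          dsimp only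
          rw [if_neg]
          simp only [pvCollinear, Bool.or_eq_true, Bool.and_eq_true, beq_iff_eq, not_or]
            at hcol ⊢
          exact ⟨hcol, hba⟩
        have hd : pvDedup (s ++ [b]) = pvDedup s ++ [b] := by
          rw [pvDedup_append]
          unfold pvDedupStep
          rw [if_pos]
          exact Or.inr (by
            rw [PySem.List.pyGet?_neg_one, hdlast, ha]
            simpa using fun h => hba h.symm)
        have hl : (s ++ [b]).getLast? = some b := by simp
        rw [hB, ← hd]
        exact ih (s ++ [b]) b (by simp) hl

theorem pvMain (points : List (Int × Int)) :
    simplify_polyline points = simplify_polyline_alt points := by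
  simp only [simplify_polyline, simplify_polyline_alt]
  have hlen2 : PySem.List.len points ≤ 2 ↔ points.length ≤ 2 := by
    simp [PySem.List.len]
  by_cases hl : points.length ≤ 2
  · rw [if_pos (hlen2.mpr hl), if_pos hl]
  · rw [if_neg (fun h => hl (hlen2.mp h)), if_neg hl]
    have hne : points ≠ [] := by intro h; subst h; simp at hl
    have h0 : PySem.List.pyGetD points 0 (0, 0) = points.headD (0, 0) := by
      rw [PySem.List.pyGetD_zero]
      cases points <;> simp
    have hpl : PySem.List.pyGetD points (-1) (0, 0) = points.getLast?.getD (0, 0) := by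
      rw [PySem.List.pyGetD_neg_one _ _ hne, List.getLast?_eq_some_getLast hne]
      rfl
    set a0 := points.headD (0, 0) with ha0
    set pl := points.getLast?.getD (0, 0) with hplv
    rw [h0, hpl, pvFoldAZ]
    set Z := (points.drop 1).zip (points.drop 2) with hZ
    have hd0 : pvDedup [a0] = [a0] := by simp [pvDedup, pvDedupStep]
    obtain ⟨hsne, hslast, hsd⟩ := pvInv Z [a0] a0 (by simp) (by simp)
    rw [hd0] at hslast hsd
    set st := Z.foldl pvStepB (a0, [a0]) with hst
    set s := Z.foldl pvStepZ [a0] with hs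
    rw [List.foldl_append, List.foldl_cons, List.foldl_nil]
    show pvDedupStep (pvDedup s) pl = _
    obtain ⟨hdne, hdlast⟩ := pvDedup_last s hsne
    have hget : PySem.List.pyGet? (pvDedup s) (-1) = some st.1 := by
      rw [PySem.List.pyGet?_neg_one, hdlast, hslast]
    unfold pvDedupStep
    by_cases hp : pl = st.1
    · rw [if_neg (by rw [hget]; simp [hp, hdne]), if_neg (by simp [hp]), hsd]
    · rw [if_pos (Or.inr (by rw [hget]; simpa using fun h => hp h.symm)),
        if_pos (by simpa using hp), hsd]

-- ===== VERDICT =====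
theorem simplify_polyline_spec : Claim_equal_simplify_polyline := by
  intro points _
  unfold Spec_simplify_polyline
  exact pvMain points
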